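-- pv_equiv track=rewrite | github.com/patrickave/AskAnArchBot | bot/rag/chunker.py | _split_at_header
-- ===== SOURCE A (Python) =====
-- def _split_at_header(lines: list[str], prefix: str) -> list[tuple[str, int, list[str]]]:
--     """Split *lines* at lines starting with *prefix* (e.g. ``'## '``).
--
--     Returns a list of ``(header_text, start_line_offset, body_lines)`` tuples.
--     Content before the first matching header is grouped under header ``""``.
--     """
--     sections: list[tuple[str, int, list[str]]] = []
--     current_header = ""
--     current_start = 0
--     current_lines: list[str] = []
--
--     for idx, line in enumerate(lines):
--         # Must start with the prefix exactly (e.g. "## " but not "### ")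
--         if line.startswith(prefix) and (
--             len(prefix) >= len(line) or not line[len(prefix) - 1] == "#"
--         ):
--             # flush previous section
--             if current_lines or current_header:
--                 sections.append((current_header, current_start, current_lines))
--             current_header = line.strip().lstrip("#").strip()
--             current_start = idx
--             current_lines = [line]
--         else:
--             current_lines.append(line)
--
--     # flush last section
--     if current_lines or current_header:
--         sections.append((current_header, current_start, current_lines))
--
--     return sections
-- ===== SOURCE B (Python) =====
-- def _split_at_header(lines: list[str], prefix: str) -> list[tuple[str, int, list[str]]]:
--     """Recursive re-implementation: split off sections at the next header line."""
--
--     def is_header(line: str) -> bool: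
--         return line.startswith(prefix) and (
--             len(prefix) >= len(line) or not line[len(prefix) - 1] == "#"
--         )
--
--     def header_text(line: str) -> str:
--         return line.strip().lstrip("#").strip()
--
--     def go(chunk: list[str], off: int) -> list[tuple[str, int, list[str]]]:
--         # chunk is empty or starts with a header line
--         if not chunk:
--             return []
--         k = next((i for i in range(1, len(chunk)) if is_header(chunk[i])), len(chunk))
--         return [(header_text(chunk[0]), off, chunk[:k])] + go(chunk[k:], off + k)
--
--     k0 = next((i for i in range(len(lines)) if is_header(lines[i])), len(lines))
--     pre = lines[:k0]
--     head = [("", 0, pre)] if pre else []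
--     return head + go(lines[k0:], k0)
-- ===== Notes on version B (the rewrite author's own statement) =====
-- stated objective: alternative
-- what changed: A's single stateful pass (accumulator state machine with current_header/current_start/current_lines and flush logic) is replaced by a recursive decomposition: find the next header index, slice that section off, and recurse on the rest, with the preamble emitted up front.
import Mathlib
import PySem

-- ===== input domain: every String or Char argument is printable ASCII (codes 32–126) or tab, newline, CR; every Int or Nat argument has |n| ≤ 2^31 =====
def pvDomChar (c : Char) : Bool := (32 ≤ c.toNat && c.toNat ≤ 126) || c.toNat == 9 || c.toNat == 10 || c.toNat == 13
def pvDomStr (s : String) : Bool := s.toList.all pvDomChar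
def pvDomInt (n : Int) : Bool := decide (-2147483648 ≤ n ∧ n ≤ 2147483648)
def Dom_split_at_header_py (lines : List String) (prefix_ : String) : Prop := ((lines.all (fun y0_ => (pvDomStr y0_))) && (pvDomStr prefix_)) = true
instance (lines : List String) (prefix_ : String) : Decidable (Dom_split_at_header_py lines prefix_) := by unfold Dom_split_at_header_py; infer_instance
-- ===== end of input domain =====

-- B replaces A's single stateful accumulator pass with a recursive split at the next header; alternative decomposition, same cost.


-- ===== PORT A =====
-- line.startswith(prefix) and (len(prefix) >= len(line) or not line[len(prefix)-1] == "#")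
-- (the guarded index is ported with pyGet?, which handles Python's negative index exactly)
def isHdrA (prefix_ line : String) : Bool :=
  PySem.Str.startswith line prefix_ &&
    (decide ((PySem.Str.len prefix_ : Int) ≥ PySem.Str.len line) ||
      !(PySem.Str.pyGet? line ((PySem.Str.len prefix_ : Int) - 1) == some '#'))

-- line.strip().lstrip("#").strip()  — lstrip("#") ported by hand as dropWhile (== '#'), exact for a one-char chars argument
def hdrTextA (line : String) : String :=
  String.ofList (PySem.Chars.strip (List.dropWhile (· == '#') (PySem.Chars.strip line.toList)))

-- the for-loop: index counter idx, state (sections, current_header, current_start, current_lines)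
def loopA (prefix_ : String) : Nat →
    (List (String × Int × List String) × String × Int × List String) → List String →
    (List (String × Int × List String) × String × Int × List String)
  | _, st, [] => st
  | idx, (secs, h, s, cur), line :: rest =>
      if isHdrA prefix_ line then
        loopA prefix_ (idx + 1)
          ((if cur ≠ [] ∨ h ≠ "" then secs ++ [(h, s, cur)] else secs),
            hdrTextA line, (idx : Int), [line]) rest
      else
        loopA prefix_ (idx + 1) (secs, h, s, cur ++ [line]) rest

def split_at_header_py (lines : List String) (prefix_ : String) : List (String × Int × List String) :=
  let st := loopA prefix_ 0 ([], "", 0, []) lines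
  if st.2.2.2 ≠ [] ∨ st.2.1 ≠ "" then st.1 ++ [(st.2.1, st.2.2.1, st.2.2.2)] else st.1

-- ===== PORT B =====
def isHdrB (prefix_ line : String) : Bool :=
  PySem.Str.startswith line prefix_ &&
    (decide ((PySem.Str.len prefix_ : Int) ≥ PySem.Str.len line) ||
      !(PySem.Str.pyGet? line ((PySem.Str.len prefix_ : Int) - 1) == some '#'))

def hdrTextB (line : String) : String :=
  String.ofList (PySem.Chars.strip (List.dropWhile (· == '#') (PySem.Chars.strip line.toList)))

-- go(chunk, off): chunk empty or starts with a header; k = next header index in chunk[1:] + 1 (or len(chunk))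
def goB (prefix_ : String) : List String → Nat → List (String × Int × List String)
  | [], _ => []
  | l :: rest, off =>
      let j := rest.findIdx (isHdrB prefix_)
      (hdrTextB l, (off : Int), l :: rest.take j) :: goB prefix_ (rest.drop j) (off + j + 1)
  termination_by chunk _ => chunk.length
  decreasing_by simp

def split_at_header_py_alt (lines : List String) (prefix_ : String) : List (String × Int × List String) :=
  let k0 := lines.findIdx (isHdrB prefix_)
  let pre := lines.take k0
  (if pre ≠ [] then [(("" : String), (0 : Int), pre)] else []) ++ goB prefix_ (lines.drop k0) k0

-- ===== PRECONDITION & SPEC =====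
def Spec_split_at_header_py (lines : List String) (prefix_ : String) (out : List (String × Int × List String)) : Prop := out = split_at_header_py_alt lines prefix_
instance (lines : List String) (prefix_ : String) (out : List (String × Int × List String)) : Decidable (Spec_split_at_header_py lines prefix_ out) := by unfold Spec_split_at_header_py; infer_instance

-- ===== CLAIM (what is proved, stated in full; the proofs are below) =====
def Claim_equal_split_at_header_py : Prop := ∀ (lines : List String) (prefix_ : String), Dom_split_at_header_py lines prefix_ → Spec_split_at_header_py lines prefix_ (split_at_header_py lines prefix_)

-- ===== LEMMAS AND PROOFS =====

-- the sections A's loop emits from pending state (h, s, cur) at index idx over the remaining lines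
def flushOne (h : String) (s : Int) (cur : List String) : List (String × Int × List String) :=
  if cur ≠ [] ∨ h ≠ "" then [(h, s, cur)] else []

def Fspec (prefix_ : String) (h : String) (s : Int) (cur : List String) :
    Nat → List String → List (String × Int × List String)
  | _, [] => flushOne h s cur
  | idx, l :: ls =>
      if isHdrA prefix_ l then
        flushOne h s cur ++ Fspec prefix_ (hdrTextA l) (idx : Int) [l] (idx + 1) ls
      else
        Fspec prefix_ h s (cur ++ [l]) (idx + 1) ls

theorem loopA_char (prefix_ : String) (ls : List String) :
    ∀ (idx : Nat) (secs : List (String × Int × List String)) (h : String) (s : Int)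
      (cur : List String),
      (let st := loopA prefix_ idx (secs, h, s, cur) ls
       if st.2.2.2 ≠ [] ∨ st.2.1 ≠ "" then st.1 ++ [(st.2.1, st.2.2.1, st.2.2.2)] else st.1)
        = secs ++ Fspec prefix_ h s cur idx ls := by
  induction ls with
  | nil =>
      intro idx secs h s cur
      simp only [loopA, Fspec, flushOne]
      split_ifs <;> simp
  | cons l ls ih =>
      intro idx secs h s cur
      simp only [loopA, Fspec]
      by_cases hl : isHdrA prefix_ l
      · simp only [hl, if_true]
        rw [ih]
        by_cases hc : cur ≠ [] ∨ h ≠ ""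
        · simp [flushOne, hc]
        · simp [flushOne, hc]
      · simp only [hl, if_false, Bool.false_eq_true]
        rw [ih]

theorem isHdr_eq : isHdrA = isHdrB := rfl

theorem goB_cons (prefix_ : String) (l : String) (rest : List String) (off : Nat) :
    goB prefix_ (l :: rest) off =
      (hdrTextB l, (off : Int), l :: rest.take (rest.findIdx (isHdrB prefix_))) ::
        goB prefix_ (rest.drop (rest.findIdx (isHdrB prefix_)))
          (off + rest.findIdx (isHdrB prefix_) + 1) := by
  conv_lhs => rw [goB]

theorem findIdx_cons_header {p : String → Bool} {l : String} {ls : List String}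
    (hl : p l) : (l :: ls).findIdx p = 0 := by
  simp [List.findIdx_cons, hl]

theorem findIdx_cons_nonheader {p : String → Bool} {l : String} {ls : List String}
    (hl : ¬ p l) : (l :: ls).findIdx p = ls.findIdx p + 1 := by
  simp [List.findIdx_cons, hl]

-- Fspec from a pending section: emit the pending section (fed with the lines up to the
-- next header) and continue with goB from that header
theorem Fspec_pend_aux (prefix_ : String) (n : Nat) :
    ∀ (ls : List String), ls.length ≤ n →
    ∀ (h : String) (s : Int) (cur : List String) (idx : Nat),
      Fspec prefix_ h s cur idx ls =
        flushOne h s (cur ++ ls.take (ls.findIdx (isHdrA prefix_))) ++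
          goB prefix_ (ls.drop (ls.findIdx (isHdrA prefix_)))
            (idx + ls.findIdx (isHdrA prefix_)) := by
  induction n with
  | zero =>
      intro ls hn
      have : ls = [] := List.eq_nil_of_length_eq_zero (Nat.le_zero.mp hn)
      subst this
      intro h s cur idx
      simp [Fspec, goB]
  | succ n ih =>
    intro ls hn
    cases ls with
    | nil =>
        intro h s cur idx
        simp [Fspec, goB]
    | cons l ls =>
        intro h s cur idx
        by_cases hl : isHdrA prefix_ l
        · have hf : (l :: ls).findIdx (isHdrA prefix_) = 0 := findIdx_cons_header hl
          rw [isHdr_eq] at hf ⊢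
          simp only [Fspec, hl, if_true]
          rw [ih ls (by simp at hn; omega)]
          rw [hf]
          simp only [List.take_zero, List.drop_zero, List.append_nil, Nat.add_zero]
          rw [goB_cons]
          rw [← isHdr_eq]
          have hcur : ([l] ++ ls.take (ls.findIdx (isHdrA prefix_))) ≠ [] := by simp
          simp only [flushOne, hcur, ne_eq]
          rw [isHdr_eq]
          simp only [List.cons_append, List.nil_append]
          have : idx + 1 + ls.findIdx (isHdrB prefix_) = idx + ls.findIdx (isHdrB prefix_) + 1 := by omega
          rw [this]
          rfl
        · have hf : (l :: ls).findIdx (isHdrA prefix_) = ls.findIdx (isHdrA prefix_) + 1 := by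
            rw [isHdr_eq] at hl ⊢; exact findIdx_cons_nonheader hl
          simp only [Fspec, hl, if_false, Bool.false_eq_true]
          rw [ih ls (by simp at hn; omega)]
          rw [hf]
          simp only [List.take_succ_cons, List.drop_succ_cons, List.append_assoc,
            List.singleton_append]
          have : idx + 1 + ls.findIdx (isHdrA prefix_) = idx + (ls.findIdx (isHdrA prefix_) + 1) := by omega
          rw [this]

theorem Fspec_pend (prefix_ : String) (ls : List String) (h : String) (s : Int)
    (cur : List String) (idx : Nat) :
    Fspec prefix_ h s cur idx ls =
      flushOne h s (cur ++ ls.take (ls.findIdx (isHdrA prefix_))) ++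
        goB prefix_ (ls.drop (ls.findIdx (isHdrA prefix_)))
          (idx + ls.findIdx (isHdrA prefix_)) :=
  Fspec_pend_aux prefix_ ls.length ls le_rfl h s cur idx

-- ===== VERDICT (by name: the statement is the Claim_ definition above) =====
theorem split_at_header_py_spec : Claim_equal_split_at_header_py := by
  intro lines prefix_ _
  unfold Spec_split_at_header_py split_at_header_py split_at_header_py_alt
  rw [loopA_char]
  rw [Fspec_pend]
  rw [isHdr_eq]
  simp only [List.nil_append, List.nil_append, flushOne, Nat.zero_add]
  split_ifs with h1 h2 h2 <;> simp_all
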